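-- pv_equiv track=rewrite | github.com/mjsantoni/Algo1_TPs | tp2/tp2.py | generar_crucigrama
-- ===== SOURCE A (Python) =====
-- def es_par(n):
-- 	'''Devuelve True si el numero ingresado es par, caso contrario devuelve False.'''
-- 	return n%2==0
--
-- def generar_crucigrama(horizontal,verticales):
-- 	'''Recibe todo lo necesario para armar un crucigrama que proviene de la funcion generar_palabras_random. Genera un crucigrama. Devuelve el crucigrama armado en forma de lista de listas que luego sera modificado para ser impreso.'''
-- #--------------
-- #Creo el crucigrama vacio.
-- 	crucigrama = []
-- 	vertical_mas_larga = ''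
-- 	for i in range(len(verticales)):
-- 		if len(verticales[i][0]) > len(vertical_mas_larga):
-- 				vertical_mas_larga = verticales[i][0]
-- 	cant_filas = len(vertical_mas_larga) * 2 #Numero de filas
-- 	for num in range(cant_filas - 1):
-- 		crucigrama.append([])
--
-- #--------------
-- #Lleno el crucigrama
-- 	posicion_horizontal = int(len(crucigrama)/2) #numero de fila donde esta la horizontal
-- 	contador_palabra_vertical = 0
-- 	letra_horizontal = 0
-- 	for columna in range(len(horizontal)):
-- 		switch = False #cambia a True cuando la palabra vertical comienza y asi saber a partir de que fila insertar los caracteres de la palabra vertical.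
-- 		letra = 0
-- 		if contador_palabra_vertical < len(verticales):
-- 			tupla_1 = verticales[contador_palabra_vertical][1][1]
-- 			palabra_vertical = verticales[contador_palabra_vertical][0]
-- 		for fila in range(len(crucigrama)):
-- 			if columna == 0:
-- 				if int(fila + tupla_1) == posicion_horizontal:
-- 					switch = True
-- 				if switch and letra < len(palabra_vertical):
-- 					crucigrama[fila] += verticales[contador_palabra_vertical][0][letra]
-- 					letra += 1
-- 				else:
-- 					crucigrama[fila] += ' '
-- 			if es_par(columna) and columna != 0:
-- 				if int(fila + tupla_1) == posicion_horizontal: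
-- 					switch = True
-- 				if switch and letra < len(palabra_vertical):
-- 					crucigrama[fila][0] += verticales[contador_palabra_vertical][0][letra]
-- 					letra += 1
-- 				else:
-- 					crucigrama[fila][0] += ' '
-- 			if not es_par(columna):
-- 				if fila == posicion_horizontal:
-- 					crucigrama[fila][0] += horizontal[letra_horizontal]
-- 				else:
-- 					crucigrama[fila][0] += ' '
-- 		if es_par(columna):
-- 			contador_palabra_vertical += 1
-- 		letra_horizontal += 1
--
-- #---------------------------
-- #Le saco las lineas vacias al crucigrama, las que 'sobran'.
-- 	cont_linea = 0
-- 	while cont_linea != len(crucigrama):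
-- 		if crucigrama[cont_linea][0].isspace():
-- 			crucigrama.pop(cont_linea)
-- 			continue
-- 		else:
-- 			cont_linea += 1
-- 	return crucigrama
-- ===== SOURCE B (Python) =====
-- def generar_crucigrama(horizontal, verticales):
--     '''Builds the crossword row by row: computes the grid size, fills each row
--     directly from the word positions, then drops all-space rows.'''
--     n = len(horizontal)
--     longest = max((len(w) for w, _ in verticales), default=0)
--     rows = 2 * longest - 1 if longest else 0
--     pos = rows // 2
--
--     def cell(r, c):
--         if c % 2 == 1:
--             return horizontal[c] if r == pos else ' '
--         if c // 2 >= len(verticales):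
--             return ' '
--         w, ps = verticales[c // 2]
--         r0 = pos - ps[1]
--         if 0 <= r0 < rows and r0 <= r < r0 + len(w):
--             return w[r - r0]
--         return ' '
--
--     grid = [''.join(cell(r, c) for c in range(n)) for r in range(rows)]
--     return [[row] for row in grid if not row.isspace()]
-- ===== Notes on version B (the rewrite author's own statement) =====
-- stated objective: simpler
-- what changed: B replaces A's column-by-column mutation of the grid with its switch/letter-counter state machine and final while/pop sweep by a direct row-major construction: a closed-form cell(r,c) function, one comprehension building each row string, and a filter dropping all-space rows.
import Mathlib
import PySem

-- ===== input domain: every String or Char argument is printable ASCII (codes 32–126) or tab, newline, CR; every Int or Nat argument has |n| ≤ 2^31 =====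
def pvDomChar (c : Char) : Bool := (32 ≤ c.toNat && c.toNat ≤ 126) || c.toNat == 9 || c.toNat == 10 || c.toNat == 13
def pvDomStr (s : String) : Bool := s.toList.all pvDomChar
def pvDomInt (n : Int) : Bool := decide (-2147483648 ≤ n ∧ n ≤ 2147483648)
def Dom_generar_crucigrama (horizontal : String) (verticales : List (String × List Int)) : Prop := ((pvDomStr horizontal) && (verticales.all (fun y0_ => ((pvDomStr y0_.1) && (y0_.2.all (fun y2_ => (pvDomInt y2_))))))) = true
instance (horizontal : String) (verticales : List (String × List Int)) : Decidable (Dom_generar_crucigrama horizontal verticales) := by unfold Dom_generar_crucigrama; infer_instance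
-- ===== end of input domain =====

-- B builds the crossword row by row from a closed-form cell function instead of A's
-- column-by-column stateful mutation; objective: simpler (same asymptotic cost).

-- ===== PORT A =====

-- es_par(n)
def pvEsPar (n : Int) : Bool := PySem.Int.mod n 2 == 0

-- Python 'row[0] += s'; Python raises IndexError on an empty row (excluded by Pre_)
def pvAddHead (row : List String) (s : String) : List String :=
  match row with
  | [] => []
  | x :: t => (x ++ s) :: t

-- Python 'verticales[cv][0][letra]' as a 1-char string; getD defaults are only
-- reached where Python raises (excluded by Pre_)
def pvVChar (verticales : List (String × List Int)) (cv letra : Nat) : String :=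
  String.ofList [((PySem.List.pyGet? verticales (cv : Int)).getD ("", [])).1.toList.getD letra ' ']

-- the inner 'for fila in range(len(crucigrama))' loop of A, one column
def pvFilaLoop (verticales : List (String × List Int)) (pos : Int) (columna : Nat)
    (cv : Nat) (t1 : Int) (pal : String) (hch : String) :
    List (List String) → Nat → Bool → Nat → List (List String)
  | [], _, _, _ => []
  | row :: rest, fila, sw, letra =>
    if columna = 0 then
      let sw2 := if (fila : Int) + t1 = pos then true else sw
      if sw2 && decide (letra < pal.toList.length) then
        (row ++ [pvVChar verticales cv letra]) ::
          pvFilaLoop verticales pos columna cv t1 pal hch rest (fila + 1) sw2 (letra + 1)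
      else
        (row ++ [" "]) :: pvFilaLoop verticales pos columna cv t1 pal hch rest (fila + 1) sw2 letra
    else if pvEsPar (columna : Int) then
      let sw2 := if (fila : Int) + t1 = pos then true else sw
      if sw2 && decide (letra < pal.toList.length) then
        pvAddHead row (pvVChar verticales cv letra) ::
          pvFilaLoop verticales pos columna cv t1 pal hch rest (fila + 1) sw2 (letra + 1)
      else
        pvAddHead row " " :: pvFilaLoop verticales pos columna cv t1 pal hch rest (fila + 1) sw2 letra
    else
      (if (fila : Int) = pos then pvAddHead row hch else pvAddHead row " ") ::
        pvFilaLoop verticales pos columna cv t1 pal hch rest (fila + 1) sw letra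

-- the outer 'for columna in range(len(horizontal))' loop of A
def pvColLoop (horizontal : String) (verticales : List (String × List Int)) (pos : Int) :
    List Nat → List (List String) → Nat → Int → String → Nat → List (List String)
  | [], cruc, _, _, _, _ => cruc
  | columna :: rest, cruc, cv, t1, pal, lh =>
    let t1' := if cv < verticales.length then
        (PySem.List.pyGet? (((PySem.List.pyGet? verticales (cv : Int)).getD ("", [])).2) 1).getD 0
      else t1
    let pal' := if cv < verticales.length then
        ((PySem.List.pyGet? verticales (cv : Int)).getD ("", [])).1
      else pal
    let hch := String.ofList [horizontal.toList.getD lh ' ']  -- horizontal[letra_horizontal]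
    let cruc' := pvFilaLoop verticales pos columna cv t1' pal' hch cruc 0 false 0
    pvColLoop horizontal verticales pos rest cruc'
      (if pvEsPar (columna : Int) then cv + 1 else cv) t1' pal' (lh + 1)

-- the final 'while' loop removing all-space rows ('row[0]' raises on an empty row
-- only where Pre_ already excludes the input)
def pvQuitar : List (List String) → List (List String)
  | [] => []
  | row :: rest =>
    if PySem.Str.strIsspace (row.headD "") then pvQuitar rest else row :: pvQuitar rest

def generar_crucigrama (horizontal : String) (verticales : List (String × List Int)) :
    List (List String) :=
  let vertical_mas_larga := verticales.foldl
      (fun (acc : String) p => if acc.toList.length < p.1.toList.length then p.1 else acc) ""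
  let cant_filas := vertical_mas_larga.toList.length * 2
  let crucigrama : List (List String) := List.replicate (cant_filas - 1) []
  let posicion_horizontal : Int := ((crucigrama.length / 2 : Nat) : Int)
  pvQuitar (pvColLoop horizontal verticales posicion_horizontal
    (List.range horizontal.toList.length) crucigrama 0 0 "" 0)

-- ===== PORT B =====

-- cell(r, c) of Source B
def pvCell (horizontal : String) (verticales : List (String × List Int)) (pos : Int)
    (rows : Nat) (r c : Nat) : Char :=
  if c % 2 = 1 then
    if (r : Int) = pos then horizontal.toList.getD c ' ' else ' '
  else if verticales.length ≤ c / 2 then ' '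
  else
    let p := (PySem.List.pyGet? verticales ((c / 2 : Nat) : Int)).getD ("", [])
    let t := (PySem.List.pyGet? p.2 1).getD 0
    let r0 := pos - t
    if 0 ≤ r0 ∧ r0 < (rows : Int) ∧ r0 ≤ (r : Int) ∧ (r : Int) < r0 + p.1.toList.length then
      p.1.toList.getD ((r : Int) - r0).toNat ' '
    else ' '

def generar_crucigrama_alt (horizontal : String) (verticales : List (String × List Int)) :
    List (List String) :=
  let n := horizontal.toList.length
  let longest := PySem.List.maxD (verticales.map (fun p => p.1.toList.length)) (fun x => x) 0
  let rows : Nat := if longest = 0 then 0 else 2 * longest - 1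
  let pos : Int := ((rows / 2 : Nat) : Int)
  let grid := (List.range rows).map
      (fun r => String.ofList ((List.range n).map (fun c => pvCell horizontal verticales pos rows r c)))
  (grid.filter (fun s => !PySem.Str.strIsspace s)).map (fun s => [s])

-- ===== PRECONDITION & SPEC =====

-- Pre_ excludes exactly the inputs on which the Python A raises: a nonempty horizontal
-- with a position list of fewer than 2 entries among those A reads (IndexError), or with
-- no verticales at all while some vertical word is nonempty (NameError/IndexError), or a
-- horizontal word overrunning 2*len(verticales) so that the stale last vertical word
-- would be re-placed (IndexError), or an empty horizontal with a nonempty vertical word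
-- (IndexError while removing rows). A returns normally on everything Pre_ admits.
def Pre_generar_crucigrama (horizontal : String) (verticales : List (String × List Int)) : Prop :=
  let n := horizontal.toList.length
  let m := verticales.length
  let L := (verticales.map (fun p => p.1.toList.length)).foldl max 0
  let rows : Nat := 2 * L - 1
  let pos : Int := ((rows / 2 : Nat) : Int)
  let r0 : Int := pos - (verticales.getD (m - 1) ("", [])).2.getD 1 0
  if n = 0 then L = 0
  else
    (∀ k < min (n / 2 + 1) m, 2 ≤ ((verticales.getD k ("", [])).2.length)) ∧
    (L = 0 ∨ n ≤ 2 * m ∨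
      (r0 < 0 ∨ (rows : Int) ≤ r0 ∨ (verticales.getD (m - 1) ("", [])).1.toList.length = 0))

instance (horizontal : String) (verticales : List (String × List Int)) :
    Decidable (Pre_generar_crucigrama horizontal verticales) := by
  unfold Pre_generar_crucigrama; infer_instance

def pvWitness_generar_crucigrama : String × (List (String × List Int)) :=
  ("ab", [("xy", [0, 0])])

def Spec_generar_crucigrama (horizontal : String) (verticales : List (String × List Int))
    (out : List (List String)) : Prop := out = generar_crucigrama_alt horizontal verticales
instance (horizontal : String) (verticales : List (String × List Int)) (out : List (List String)) :
    Decidable (Spec_generar_crucigrama horizontal verticales out) := by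
  unfold Spec_generar_crucigrama; infer_instance

-- ===== CLAIM (what is proved, stated in full; the proofs are below) =====
def Claim_equal_generar_crucigrama : Prop := ∀ (horizontal : String) (verticales : List (String × List Int)), Dom_generar_crucigrama horizontal verticales → Pre_generar_crucigrama horizontal verticales → Spec_generar_crucigrama horizontal verticales (generar_crucigrama horizontal verticales)

-- ===== LEMMAS AND PROOFS =====

theorem pvEsPar_natCast (c : Nat) : pvEsPar (c : Int) = decide (c % 2 = 0) := by
  rw [pvEsPar, show ((2:Int)) = ((2:Nat):Int) by norm_num, PySem.Int.mod_natCast]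
  rcases Nat.mod_two_eq_zero_or_one c with h | h <;> simp [h]

-- the A-side state of the crossword after the first c columns have been processed
def pvRowStr (horizontal : String) (verticales : List (String × List Int)) (pos : Int)
    (rows : Nat) (r c : Nat) : String :=
  String.ofList ((List.range c).map (fun j => pvCell horizontal verticales pos rows r j))

def pvStateRows (horizontal : String) (verticales : List (String × List Int)) (pos : Int)
    (rows c : Nat) : List (List String) :=
  (List.range' 0 rows).map
    (fun r => if c = 0 then ([] : List String)
              else [pvRowStr horizontal verticales pos rows r c])

theorem pvFila_odd (vs : List (String × List Int)) (pos : Int) (c cv : Nat) (t1 : Int)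
    (pal hch : String) (f : Nat → List String) (hc : c % 2 = 1) :
    ∀ (k fila : Nat) (sw : Bool) (letra : Nat),
    pvFilaLoop vs pos c cv t1 pal hch ((List.range' fila k).map f) fila sw letra
    = (List.range' fila k).map (fun (r : Nat) => pvAddHead (f r) (if (r : Int) = pos then hch else " ")) := by
  have hc0 : ¬ c = 0 := by omega
  have hpar : pvEsPar (c : Int) = false := by
    rw [pvEsPar_natCast]; simp [hc]
  intro k
  induction k with
  | zero => intro fila sw letra; rfl
  | succ n ih =>
    intro fila sw letra
    rw [List.range'_succ]
    simp only [List.map_cons, pvFilaLoop, hc0, hpar, if_false, Bool.false_eq_true]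
    rw [ih (fila + 1) sw letra]
    congr 1
    split_ifs <;> rfl

theorem pvFila_even (vs : List (String × List Int)) (pos : Int) (c cv : Nat) (t1 : Int)
    (pal hch : String) (f : Nat → List String) (hc : c % 2 = 0) :
    ∀ (k fila : Nat) (sw : Bool) (letra : Nat),
    sw = decide (0 ≤ pos - t1 ∧ pos - t1 < (fila : Int)) →
    letra = (if 0 ≤ pos - t1 ∧ pos - t1 ≤ (fila : Int)
             then min ((fila : Int) - (pos - t1)).toNat pal.toList.length else 0) →
    pvFilaLoop vs pos c cv t1 pal hch ((List.range' fila k).map f) fila sw letra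
    = (List.range' fila k).map (fun (r : Nat) =>
        let s := if 0 ≤ pos - t1 ∧ pos - t1 ≤ (r : Int) ∧ (r : Int) < (pos - t1) + pal.toList.length
                 then pvVChar vs cv ((r : Int) - (pos - t1)).toNat else " "
        if c = 0 then f r ++ [s] else pvAddHead (f r) s) := by
  have hpar : pvEsPar (c : Int) = true := by rw [pvEsPar_natCast]; simp [hc]
  intro k
  induction k with
  | zero => intro fila sw letra _ _; rfl
  | succ n ih =>
    intro fila sw letra hsw hletra
    rw [List.range'_succ]
    simp only [List.map_cons, pvFilaLoop, hpar, if_true]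
    have hsw2 : (if (fila : Int) + t1 = pos then true else sw)
        = decide (0 ≤ pos - t1 ∧ pos - t1 ≤ (fila : Int)) := by
      split_ifs with hfe
      · symm; rw [decide_eq_true_iff]; omega
      · rw [hsw]; simp only [decide_eq_decide]; omega
    have hcomb : (decide (0 ≤ pos - t1 ∧ pos - t1 ≤ (fila : Int))
          && decide (letra < pal.toList.length))
        = decide (0 ≤ pos - t1 ∧ pos - t1 ≤ (fila : Int)
            ∧ (fila : Int) < (pos - t1) + pal.toList.length) := by
      first
      | rw [← decide_and]
      | rw [← Bool.decide_and]
      simp only [decide_eq_decide]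
      by_cases h1 : 0 ≤ pos - t1 ∧ pos - t1 ≤ (fila : Int)
      · rw [if_pos h1] at hletra; omega
      · rw [if_neg h1] at hletra; omega
    rw [hsw2, hcomb]
    simp only [decide_eq_true_eq]
    by_cases hP : 0 ≤ pos - t1 ∧ pos - t1 ≤ (fila : Int)
        ∧ (fila : Int) < (pos - t1) + pal.toList.length
    · have hlv : letra = ((fila : Int) - (pos - t1)).toNat := by
        rw [hletra, if_pos ⟨hP.1, hP.2.1⟩]; omega
      have hs1 : decide (0 ≤ pos - t1 ∧ pos - t1 ≤ (fila : Int))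
          = decide (0 ≤ pos - t1 ∧ pos - t1 < (((fila + 1 : Nat)) : Int)) := by
        simp only [decide_eq_decide]; push_cast; omega
      have hl1 : letra + 1 = (if 0 ≤ pos - t1 ∧ pos - t1 ≤ (((fila + 1 : Nat)) : Int)
          then min ((((fila + 1 : Nat)) : Int) - (pos - t1)).toNat pal.toList.length else 0) := by
        rw [if_pos (by push_cast; omega)]; push_cast; omega
      rw [if_pos hP, ih (fila + 1) _ _ hs1 hl1, hlv]
      split_ifs <;> rfl
    · have hs1 : decide (0 ≤ pos - t1 ∧ pos - t1 ≤ (fila : Int))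
          = decide (0 ≤ pos - t1 ∧ pos - t1 < (((fila + 1 : Nat)) : Int)) := by
        simp only [decide_eq_decide]; push_cast; omega
      have hl1 : letra = (if 0 ≤ pos - t1 ∧ pos - t1 ≤ (((fila + 1 : Nat)) : Int)
          then min ((((fila + 1 : Nat)) : Int) - (pos - t1)).toNat pal.toList.length else 0) := by
        rw [hletra]
        split_ifs <;> push_cast <;> omega
      rw [if_neg hP, ih (fila + 1) _ letra hs1 hl1]
      split_ifs <;> rfl

theorem pvQuitar_map_singleton (l : List String) :
    pvQuitar (l.map (fun s => [s]))
    = (l.filter (fun s => !PySem.Str.strIsspace s)).map (fun s => [s]) := by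
  induction l with
  | nil => rfl
  | cons s t ih =>
    by_cases h : PySem.Chars.strIsspace s.toList <;>
      simp [pvQuitar, PySem.Str.strIsspace_eq, h, ih, List.filter]

theorem pvT_eq (ps : List Int) : (PySem.List.pyGet? ps 1).getD 0 = ps.getD 1 0 := by
  rw [show (1 : Int) = ((1 : Nat) : Int) by norm_num, PySem.List.pyGet?_natCast,
    List.getD_eq_getElem?_getD]

theorem pvLongest_len (vs : List (String × List Int)) :
    (vs.foldl (fun (acc : String) p => if acc.toList.length < p.1.toList.length then p.1 else acc)
        "").toList.length
    = (vs.map (fun p => p.1.toList.length)).foldl max 0 := by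
  suffices h : ∀ (l : List (String × List Int)) (acc : String),
      (l.foldl (fun (acc : String) p => if acc.toList.length < p.1.toList.length then p.1 else acc)
        acc).toList.length
      = (l.map (fun p => p.1.toList.length)).foldl max acc.toList.length by
    simpa using h vs ""
  intro l
  induction l with
  | nil => intro acc; rfl
  | cons p t ih =>
    intro acc
    simp only [List.foldl_cons, List.map_cons, ih]
    congr 1
    split_ifs with h <;> omega

theorem pvMaxD_eq (vs : List (String × List Int)) :
    PySem.List.maxD (vs.map (fun p => p.1.toList.length)) (fun x => x) 0
    = (vs.map (fun p => p.1.toList.length)).foldl max 0 := by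
  generalize vs.map (fun p => p.1.toList.length) = xs
  cases xs with
  | nil => rfl
  | cons x t =>
    rw [PySem.List.maxD, PySem.List.max?_id_cons]
    simp [Option.getD, List.foldl_cons]

theorem pvStep_odd (h : String) (vs : List (String × List Int)) (rows : Nat) (pos : Int)
    (c : Nat) (hpar : c % 2 = 1) (cv : Nat) (t1 : Int) (pal : String) :
    pvFilaLoop vs pos c cv t1 pal (String.ofList [h.toList.getD c ' '])
      (pvStateRows h vs pos rows c) 0 false 0
    = pvStateRows h vs pos rows (c + 1) := by
  simp only [pvStateRows]
  rw [pvFila_odd vs pos c cv t1 pal (String.ofList [h.toList.getD c ' '])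
    (fun r => if c = 0 then ([] : List String) else [pvRowStr h vs pos rows r c]) hpar rows 0 false 0]
  apply List.map_congr_left
  intro r hr
  simp only [if_neg (show ¬ c = 0 by omega), if_neg (show ¬ c + 1 = 0 by omega), pvAddHead]
  rw [pvRowStr, pvRowStr, List.range_succ, List.map_append, String.ofList_append,
    List.map_singleton]
  have : (if (r : Int) = pos then String.ofList [h.toList.getD c ' '] else " ")
      = String.ofList [pvCell h vs pos rows r c] := by
    rw [pvCell, if_pos hpar]
    split_ifs <;> rfl
  rw [this]

set_option maxHeartbeats 1000000 in
theorem pvStep_even_in (h : String) (vs : List (String × List Int)) (rows : Nat) (pos : Int)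
    (c : Nat) (hpar : c % 2 = 0) (hlt : c / 2 < vs.length) (hch : String) :
    pvFilaLoop vs pos c ((c + 1) / 2)
      ((PySem.List.pyGet? (((PySem.List.pyGet? vs (((c + 1) / 2 : Nat) : Int)).getD ("", [])).2) 1).getD 0)
      (((PySem.List.pyGet? vs (((c + 1) / 2 : Nat) : Int)).getD ("", [])).1)
      hch (pvStateRows h vs pos rows c) 0 false 0
    = pvStateRows h vs pos rows (c + 1) := by
  have hcv2 : (c + 1) / 2 = c / 2 := by omega
  have hget : PySem.List.pyGet? vs (((c + 1) / 2 : Nat) : Int) = some vs[c / 2] := by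
    rw [PySem.List.pyGet?_natCast, hcv2, List.getElem?_eq_getElem hlt]
  simp only [pvStateRows]
  rw [pvFila_even vs pos c ((c + 1) / 2) _ _ hch
    (fun r => if c = 0 then ([] : List String) else [pvRowStr h vs pos rows r c]) hpar rows 0 false 0
    (by symm; rw [decide_eq_false_iff_not]; push_cast; omega)
    (by split_ifs with hi
        · push_cast at hi ⊢; omega
        · rfl)]
  apply List.map_congr_left
  intro r hr
  have hrlt : r < rows := by have := List.mem_range'_1.mp hr; omega
  simp only [if_neg (show ¬ c + 1 = 0 by omega)]
  have hcell : (if 0 ≤ pos - (PySem.List.pyGet? (((PySem.List.pyGet? vs (((c + 1) / 2 : Nat) : Int)).getD ("", [])).2) 1).getD 0 ∧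
        pos - (PySem.List.pyGet? (((PySem.List.pyGet? vs (((c + 1) / 2 : Nat) : Int)).getD ("", [])).2) 1).getD 0 ≤ (r : Int) ∧
        (r : Int) < pos - (PySem.List.pyGet? (((PySem.List.pyGet? vs (((c + 1) / 2 : Nat) : Int)).getD ("", [])).2) 1).getD 0
          + (((PySem.List.pyGet? vs (((c + 1) / 2 : Nat) : Int)).getD ("", [])).1).toList.length
      then pvVChar vs ((c + 1) / 2)
        ((r : Int) - (pos - (PySem.List.pyGet? (((PySem.List.pyGet? vs (((c + 1) / 2 : Nat) : Int)).getD ("", [])).2) 1).getD 0)).toNat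
      else " ")
      = String.ofList [pvCell h vs pos rows r c] := by
    have hget' : PySem.List.pyGet? vs ((c / 2 : Nat) : Int) = some vs[c / 2] := by
      rw [PySem.List.pyGet?_natCast, List.getElem?_eq_getElem hlt]
    rw [pvCell]
    simp only [if_neg (show ¬ c % 2 = 1 by omega), if_neg (show ¬ vs.length ≤ c / 2 by omega)]
    simp only [hcv2, pvVChar, hget', Option.getD_some]
    split_ifs <;> first | rfl | (exfalso; omega)
  rw [hcell]
  by_cases hc0 : c = 0
  · subst hc0
    simp [pvRowStr, List.range_one]
  · simp only [if_neg hc0, pvAddHead]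
    rw [pvRowStr, pvRowStr, List.range_succ, List.map_append, String.ofList_append,
      List.map_singleton]

theorem pvStep_even_over (h : String) (vs : List (String × List Int)) (rows : Nat) (pos : Int)
    (c : Nat) (hpar : c % 2 = 0) (hge : vs.length ≤ c / 2) (hch : String) (t1 : Int) (pal : String)
    (hov' : pos - t1 < 0 ∨ (rows : Int) ≤ pos - t1 ∨ pal.toList.length = 0) :
    pvFilaLoop vs pos c ((c + 1) / 2) t1 pal hch (pvStateRows h vs pos rows c) 0 false 0
    = pvStateRows h vs pos rows (c + 1) := by
  simp only [pvStateRows]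
  rw [pvFila_even vs pos c ((c + 1) / 2) t1 pal hch
    (fun r => if c = 0 then ([] : List String) else [pvRowStr h vs pos rows r c]) hpar rows 0 false 0
    (by symm; rw [decide_eq_false_iff_not]; push_cast; omega)
    (by split_ifs with hi
        · push_cast at hi ⊢; omega
        · rfl)]
  apply List.map_congr_left
  intro r hr
  have hrlt : r < rows := by have := List.mem_range'_1.mp hr; omega
  simp only [if_neg (show ¬ c + 1 = 0 by omega)]
  have hcell : (if 0 ≤ pos - t1 ∧ pos - t1 ≤ (r : Int) ∧ (r : Int) < pos - t1 + pal.toList.length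
      then pvVChar vs ((c + 1) / 2) ((r : Int) - (pos - t1)).toNat else " ")
      = String.ofList [pvCell h vs pos rows r c] := by
    rw [pvCell]
    simp only [if_neg (show ¬ c % 2 = 1 by omega), if_pos hge]
    rw [if_neg (by omega)]
  rw [hcell]
  by_cases hc0 : c = 0
  · subst hc0
    simp [pvRowStr, List.range_one]
  · simp only [if_neg hc0, pvAddHead]
    rw [pvRowStr, pvRowStr, List.range_succ, List.map_append, String.ofList_append,
      List.map_singleton]

theorem pvColLoop_inv (h : String) (vs : List (String × List Int))
    (rows : Nat) (pos : Int)
    (hrows : rows = 2 * ((vs.map (fun p => p.1.toList.length)).foldl max 0) - 1)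
    (hov : (vs.map (fun p => p.1.toList.length)).foldl max 0 = 0 ∨
           h.toList.length ≤ 2 * vs.length ∨
           (pos - (vs.getD (vs.length - 1) ("", [])).2.getD 1 0 < 0 ∨
            (rows : Int) ≤ pos - (vs.getD (vs.length - 1) ("", [])).2.getD 1 0 ∨
            (vs.getD (vs.length - 1) ("", [])).1.toList.length = 0)) :
    ∀ (k c : Nat), c + k = h.toList.length → ∀ (t1 : Int) (pal : String),
    ((c + 1) / 2 < vs.length ∨ rows = 0 ∨
      (0 < vs.length ∧ t1 = (vs.getD (vs.length - 1) ("", [])).2.getD 1 0 ∧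
        pal = (vs.getD (vs.length - 1) ("", [])).1)) →
    pvColLoop h vs pos (List.range' c k) (pvStateRows h vs pos rows c) ((c + 1) / 2) t1 pal c
    = pvStateRows h vs pos rows h.toList.length := by
  intro k
  induction k with
  | zero =>
    intro c hc t1 pal _
    rw [show c = h.toList.length from by omega]
    rfl
  | succ kk ih =>
    intro c hc t1 pal hst
    rw [List.range'_succ]
    simp only [pvColLoop]
    have hcv : (if pvEsPar (c : Int) then (c + 1) / 2 + 1 else (c + 1) / 2) = ((c + 1) + 1) / 2 := by
      rw [pvEsPar_natCast]
      by_cases hp : c % 2 = 0 <;> simp [hp] <;> omega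
    by_cases hr0 : rows = 0
    · have hemp : ∀ c' : Nat, pvStateRows h vs pos rows c' = [] := by
        intro c'; simp [pvStateRows, hr0]
      rw [hemp c]
      rw [show ∀ (cva : Nat) (t1a : Int) (pala hcha : String),
          pvFilaLoop vs pos c cva t1a pala hcha [] 0 false 0 = [] from fun _ _ _ _ => rfl]
      rw [← hemp (c + 1), hcv]
      exact ih (c + 1) (by omega) _ _ (Or.inr (Or.inl hr0))
    · by_cases hpar : c % 2 = 0
      · have hcv2 : (c + 1) / 2 = c / 2 := by omega
        by_cases hlt : c / 2 < vs.length
        · rw [if_pos (by omega : (c + 1) / 2 < vs.length),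
            if_pos (by omega : (c + 1) / 2 < vs.length)]
          rw [pvStep_even_in h vs rows pos c hpar hlt _]
          rw [hcv]
          apply ih (c + 1) (by omega)
          by_cases hnext : ((c + 1) + 1) / 2 < vs.length
          · exact Or.inl hnext
          · have hgetm : PySem.List.pyGet? vs (((c + 1) / 2 : Nat) : Int) = some vs[c / 2] := by
              rw [PySem.List.pyGet?_natCast, hcv2, List.getElem?_eq_getElem hlt]
            have hvd : vs[c / 2] = vs.getD (vs.length - 1) ("", []) := by
              rw [List.getD_eq_getElem?_getD, show vs.length - 1 = c / 2 from by omega,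
                List.getElem?_eq_getElem hlt]
              rfl
            refine Or.inr (Or.inr ⟨by omega, ?_, ?_⟩)
            · rw [hgetm, Option.getD_some, pvT_eq, hvd]
            · rw [hgetm, Option.getD_some, hvd]
        · rw [if_neg (by omega : ¬ (c + 1) / 2 < vs.length),
            if_neg (by omega : ¬ (c + 1) / 2 < vs.length)]
          rcases hst with hst | hst | hst
          · omega
          · omega
          · obtain ⟨hm, ht, hp⟩ := hst
            have hov' : pos - t1 < 0 ∨ (rows : Int) ≤ pos - t1 ∨ pal.toList.length = 0 := by
              rcases hov with hL | hn | hov'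
              · omega
              · omega
              · rw [ht, hp]; exact hov'
            rw [pvStep_even_over h vs rows pos c hpar (by omega) _ t1 pal hov']
            rw [hcv]
            exact ih (c + 1) (by omega) t1 pal (Or.inr (Or.inr ⟨hm, ht, hp⟩))
      · have hodd : c % 2 = 1 := by omega
        rw [pvStep_odd h vs rows pos c hodd, hcv]
        apply ih (c + 1) (by omega)
        by_cases hnext : (c + 1) / 2 < vs.length
        · exact Or.inl (by omega)
        · rw [if_neg hnext, if_neg hnext]
          rcases hst with hst | hst | hst
          · omega
          · exact absurd hst hr0
          · exact Or.inr (Or.inr hst)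

-- ===== VERDICT (by name: the statement is the Claim_ definition above) =====
theorem generar_crucigrama_spec : Claim_equal_generar_crucigrama := by
  intro h vs _ hpre
  show generar_crucigrama h vs = generar_crucigrama_alt h vs
  simp only [generar_crucigrama, generar_crucigrama_alt, pvLongest_len, pvMaxD_eq,
    List.length_replicate]
  simp only [Pre_generar_crucigrama] at hpre
  by_cases hn : h.toList.length = 0
  · rw [if_pos hn] at hpre
    rw [hpre, hn]
    simp [pvQuitar, pvColLoop]
  · rw [if_neg hn] at hpre
    obtain ⟨hp1, hp2⟩ := hpre
    rw [show 2 * ((vs.map (fun p => p.1.toList.length)).foldl max 0) - 1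
        = ((vs.map (fun p => p.1.toList.length)).foldl max 0) * 2 - 1 from by omega] at hp2
    rw [show (if (vs.map (fun p => p.1.toList.length)).foldl max 0 = 0 then (0 : Nat)
        else 2 * ((vs.map (fun p => p.1.toList.length)).foldl max 0) - 1)
        = ((vs.map (fun p => p.1.toList.length)).foldl max 0) * 2 - 1 from by
      split_ifs <;> omega]
    have hinv := pvColLoop_inv h vs
      (((vs.map (fun p => p.1.toList.length)).foldl max 0) * 2 - 1)
      ((((((vs.map (fun p => p.1.toList.length)).foldl max 0) * 2 - 1) / 2 : Nat)) : Int)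
      (by omega) hp2 h.toList.length 0 (by omega) 0 "" ?hst
    case hst =>
      by_cases hm : vs.length = 0
      · refine Or.inr (Or.inl ?_)
        rw [List.eq_nil_of_length_eq_zero hm]
        rfl
      · exact Or.inl (by omega)
    have hinv' : pvColLoop h vs
        ((((((vs.map (fun p => p.1.toList.length)).foldl max 0) * 2 - 1) / 2 : Nat)) : Int)
        (List.range' 0 h.toList.length)
        (List.replicate (((vs.map (fun p => p.1.toList.length)).foldl max 0) * 2 - 1)
          ([] : List String)) 0 0 "" 0
        = pvStateRows h vs
          ((((((vs.map (fun p => p.1.toList.length)).foldl max 0) * 2 - 1) / 2 : Nat)) : Int)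
          (((vs.map (fun p => p.1.toList.length)).foldl max 0) * 2 - 1) h.toList.length := by
      rw [show List.replicate (((vs.map (fun p => p.1.toList.length)).foldl max 0) * 2 - 1)
          ([] : List String)
          = pvStateRows h vs
            ((((((vs.map (fun p => p.1.toList.length)).foldl max 0) * 2 - 1) / 2 : Nat)) : Int)
            (((vs.map (fun p => p.1.toList.length)).foldl max 0) * 2 - 1) 0 from by
        simp [pvStateRows, List.map_const']]
      exact hinv
    rw [List.range_eq_range', hinv']
    rw [show pvStateRows h vs
        ((((((vs.map (fun p => p.1.toList.length)).foldl max 0) * 2 - 1) / 2 : Nat)) : Int)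
        (((vs.map (fun p => p.1.toList.length)).foldl max 0) * 2 - 1) h.toList.length
        = ((List.range' 0 (((vs.map (fun p => p.1.toList.length)).foldl max 0) * 2 - 1)).map
            (fun r => pvRowStr h vs
              ((((((vs.map (fun p => p.1.toList.length)).foldl max 0) * 2 - 1) / 2 : Nat)) : Int)
              (((vs.map (fun p => p.1.toList.length)).foldl max 0) * 2 - 1) r h.toList.length)).map
            (fun s => [s]) from by
      simp only [pvStateRows, List.map_map]
      apply List.map_congr_left
      intro r _
      rw [if_neg hn]
      exact rfl]
    rw [pvQuitar_map_singleton]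
    simp only [pvRowStr, List.range_eq_range']
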